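-- pv_equiv track=rewrite | github.com/pyfca/pyfca | pyfca/implications.py | H
-- ===== SOURCE A (Python) =====
-- Lwidth = Hwidth = lambda n: 3**n
--
-- Lwidth = Hwidth = lambda n: 3**n
--
-- def L(g,i):
--     """recursively constructs L line for g; i = len(g)-1"""
--     g1 = g&(2**i)
--     if i:
--         n = Lwidth(i)
--         Ln = L(g,i-1)
--         if g1:
--             return Ln<<(2*n)           | Ln<<n | Ln
--         else:
--             return int('1'*n,2)<<(2*n) | Ln<<n | Ln
--     else:
--         if g1:
--             return int('000',2)
--         else:
--             return int('100',2)
--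
-- def H(g,i):
--     """recursively constructs H line for g; i = len(g)-1"""
--     g1 = g&(2**i)
--     if i:
--         n = Hwidth(i)
--         i=i-1
--         Hn = H(g,i)
--         if g1:
--             return Hn<<(2*n)           | Hn<<n     | Hn
--         else:
--             return int('1'*n,2)<<(2*n) | L(g,i)<<n | Hn
--     else:
--         if g1:
--             return int('111',2)
--         else:
--             return int('101',2)
-- ===== SOURCE B (Python) =====
-- def H(g, i):
--     """Bottom-up: one loop maintaining both the H and L line integers."""
--     if g & 1:
--         h, l = 0b111, 0b000
--     else:
--         h, l = 0b101, 0b100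
--     for j in range(1, i + 1):
--         n = 3 ** j
--         allones = (1 << n) - 1
--         if g & (1 << j):
--             h, l = h << 2*n | h << n | h, l << 2*n | l << n | l
--         else:
--             h, l = allones << 2*n | l << n | h, allones << 2*n | l << n | l
--     return h
-- ===== Notes on version B (the rewrite author's own statement) =====
-- stated objective: simpler
-- what changed: Replaces the pair of mutually recursive functions H/L (with repeated int('1'*n,2) string parsing) with a single bottom-up loop that carries both line integers (h,l) simultaneously, using arithmetic (1<<n)-1 for the all-ones block.
import Mathlib
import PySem

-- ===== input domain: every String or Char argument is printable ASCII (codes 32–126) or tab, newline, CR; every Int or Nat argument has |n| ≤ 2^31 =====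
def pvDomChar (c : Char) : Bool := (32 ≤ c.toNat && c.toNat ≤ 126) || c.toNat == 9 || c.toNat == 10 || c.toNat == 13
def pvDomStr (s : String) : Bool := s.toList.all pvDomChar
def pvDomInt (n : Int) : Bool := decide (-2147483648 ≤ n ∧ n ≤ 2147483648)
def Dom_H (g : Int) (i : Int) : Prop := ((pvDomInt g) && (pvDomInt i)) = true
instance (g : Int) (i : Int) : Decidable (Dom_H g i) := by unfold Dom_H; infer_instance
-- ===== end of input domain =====

-- B replaces the H/L mutual recursion by one bottom-up loop carrying both line integers (simpler; same cost).


-- ===== PORT A =====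
-- helper L; the level runs over Nat (Pre_H gives 0 ≤ i); int('1'*n,2) = 2^n - 1 (exact)
def Lrec (g : Int) : Nat → Int
  | 0 => if PySem.Int.band g 1 ≠ 0 then 0 else 4
  | k+1 =>
    let n : Nat := 3 ^ (k+1)
    let Ln := Lrec g k
    if PySem.Int.band g ((2:Int) ^ (k+1)) ≠ 0 then
      PySem.Int.bor (PySem.Int.bor (Ln <<< (2*n)) (Ln <<< n)) Ln
    else
      PySem.Int.bor (PySem.Int.bor (((2:Int) ^ n - 1) <<< (2*n)) (Ln <<< n)) Ln

def Hrec (g : Int) : Nat → Int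
  | 0 => if PySem.Int.band g 1 ≠ 0 then 7 else 5
  | k+1 =>
    let n : Nat := 3 ^ (k+1)
    let Hn := Hrec g k
    if PySem.Int.band g ((2:Int) ^ (k+1)) ≠ 0 then
      PySem.Int.bor (PySem.Int.bor (Hn <<< (2*n)) (Hn <<< n)) Hn
    else
      PySem.Int.bor (PySem.Int.bor (((2:Int) ^ n - 1) <<< (2*n)) ((Lrec g k) <<< n)) Hn

-- for i < 0 Python raises TypeError (excluded by Pre_H); the guard only makes the port total
def H (g : Int) (i : Int) : Int := if i < 0 then 0 else Hrec g i.toNat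

-- ===== PORT B =====
-- one loop over range(1, i+1) carrying the pair (h, l)
def Hstep (g : Int) (hl : Int × Int) (j : Int) : Int × Int :=
  let n : Nat := 3 ^ j.toNat
  let allones : Int := ((1:Int) <<< n) - 1
  if PySem.Int.band g ((1:Int) <<< j.toNat) ≠ 0 then
    (PySem.Int.bor (PySem.Int.bor (hl.1 <<< (2*n)) (hl.1 <<< n)) hl.1,
     PySem.Int.bor (PySem.Int.bor (hl.2 <<< (2*n)) (hl.2 <<< n)) hl.2)
  else
    (PySem.Int.bor (PySem.Int.bor (allones <<< (2*n)) (hl.2 <<< n)) hl.1,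
     PySem.Int.bor (PySem.Int.bor (allones <<< (2*n)) (hl.2 <<< n)) hl.2)

def H_alt (g : Int) (i : Int) : Int :=
  let init : Int × Int := if PySem.Int.band g 1 ≠ 0 then (7, 0) else (5, 4)
  ((PySem.List.pyRange 1 (i+1) 1).foldl (Hstep g) init).1

-- ===== PRECONDITION & SPEC =====
-- Pre_H excludes i < 0, where A raises TypeError (g & (2**i) on a float)
def Pre_H (g : Int) (i : Int) : Prop := 0 ≤ i
instance (g : Int) (i : Int) : Decidable (Pre_H g i) := by unfold Pre_H; infer_instance
def pvWitness_H : Int × Int := (5, 2)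

def Spec_H (g : Int) (i : Int) (out : Int) : Prop := out = H_alt g i
instance (g : Int) (i : Int) (out : Int) : Decidable (Spec_H g i out) := by unfold Spec_H; infer_instance

-- ===== CLAIM (what is proved, stated in full; the proofs are below) =====
def Claim_equal_H : Prop := ∀ (g : Int) (i : Int), Dom_H g i → Pre_H g i → Spec_H g i (H g i)

-- ===== LEMMAS AND PROOFS =====

theorem one_shl_int (n : Nat) : ((1:Int) <<< n) = 2 ^ n := by
  simp [Int.shiftLeft_eq]

theorem Hstep_succ (g : Int) (k : Nat) (hl : Int × Int) :
    Hstep g hl ((k : Int) + 1) =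
      (let n : Nat := 3 ^ (k+1)
       if PySem.Int.band g ((2:Int) ^ (k+1)) ≠ 0 then
         (PySem.Int.bor (PySem.Int.bor (hl.1 <<< (2*n)) (hl.1 <<< n)) hl.1,
          PySem.Int.bor (PySem.Int.bor (hl.2 <<< (2*n)) (hl.2 <<< n)) hl.2)
       else
         (PySem.Int.bor (PySem.Int.bor (((2:Int) ^ n - 1) <<< (2*n)) (hl.2 <<< n)) hl.1,
          PySem.Int.bor (PySem.Int.bor (((2:Int) ^ n - 1) <<< (2*n)) (hl.2 <<< n)) hl.2)) := by
  have ht : ((k : Int) + 1).toNat = k + 1 := by omega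
  simp only [Hstep, ht, one_shl_int]

theorem fold_eq_rec (g : Int) (k : Nat) :
    (PySem.List.pyRange 1 ((k : Int) + 1) 1).foldl (Hstep g)
      (if PySem.Int.band g 1 ≠ 0 then ((7:Int), (0:Int)) else (5, 4)) = (Hrec g k, Lrec g k) := by
  induction k with
  | zero =>
    rw [show ((0:ℕ):ℤ) + 1 = 1 by norm_num, PySem.List.pyRange_one_eq_nil le_rfl]
    simp only [List.foldl_nil, Hrec, Lrec]
    split <;> rfl
  | succ m ih =>
    rw [show ((m+1:ℕ):ℤ) + 1 = ((m:ℤ) + 1) + 1 by push_cast; ring,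
        PySem.List.pyRange_one_succ_right (by omega), List.foldl_append, ih]
    simp only [List.foldl_cons, List.foldl_nil]
    rw [Hstep_succ]
    simp only [Hrec, Lrec]
    split <;> rfl

-- ===== VERDICT (by name: the statement is the Claim_ definition above) =====
theorem H_spec : Claim_equal_H := by
  intro g i _ hpre
  unfold Spec_H H H_alt
  rw [if_neg (not_lt.mpr hpre)]
  conv_rhs => rw [show i = ((i.toNat : Int)) from (Int.toNat_of_nonneg hpre).symm]
  show Hrec g i.toNat =
    ((PySem.List.pyRange 1 ((i.toNat : Int) + 1) 1).foldl (Hstep g)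
      (if PySem.Int.band g 1 ≠ 0 then ((7:Int), (0:Int)) else (5, 4))).1
  rw [fold_eq_rec g i.toNat]
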